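-- pv_equiv track=rewrite | github.com/joaoavf/connect-x | iebot/iebot/iebot_v1.py | get_column_summary
-- ===== SOURCE A (Python) =====
-- def get_column_summary(column):
--     """Analyses the status of a given vertical column.
--
--     Parameters:
--     column (List): Column of a Connect4 Game mapped by (0: Empty, 1: Player 1, 2: Player 2)
--
--     Returns:
--     Tuple: (top_piece (int)   : top_piece identifier to player 1 or 2,
--             count (int)       : count of top_piece sequence,
--             free_spaces (int) : number of free cell slots in that column)"""
--
--     count, top_piece, free_spaces = 0, 0, 0
--
--     for cell_value in column:
--         if cell_value > 0:  # Cell is not empty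
--             if count == 0:
--                 top_piece = cell_value
--             if cell_value == top_piece:
--                 count += 1
--             else:
--                 break
--         else:
--             free_spaces += 1
--     # TODO remove top_piece, it is irrelevant in the code logic
--     return top_piece, count, free_spaces
-- ===== SOURCE B (Python) =====
-- def get_column_summary(column):
--     # Find top piece, then the takewhile boundary, then tally the prefix.
--     top_piece = next((c for c in column if c > 0), 0)
--     end = len(column)
--     for i, c in enumerate(column):
--         if c > 0 and c != top_piece:
--             end = i
--             break
--     prefix = column[:end]
--     free_spaces = sum(1 for c in prefix if c <= 0)
--     count = prefix.count(top_piece) if top_piece > 0 else 0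
--     return top_piece, count, free_spaces
-- ===== Notes on version B (the rewrite author's own statement) =====
-- stated objective: idiomatic
-- what changed: Replaced A's single interleaved accumulator loop with break by a find-first-piece scan, a takewhile boundary index, and two independent tallies (count / free spaces) over that prefix.
import Mathlib
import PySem

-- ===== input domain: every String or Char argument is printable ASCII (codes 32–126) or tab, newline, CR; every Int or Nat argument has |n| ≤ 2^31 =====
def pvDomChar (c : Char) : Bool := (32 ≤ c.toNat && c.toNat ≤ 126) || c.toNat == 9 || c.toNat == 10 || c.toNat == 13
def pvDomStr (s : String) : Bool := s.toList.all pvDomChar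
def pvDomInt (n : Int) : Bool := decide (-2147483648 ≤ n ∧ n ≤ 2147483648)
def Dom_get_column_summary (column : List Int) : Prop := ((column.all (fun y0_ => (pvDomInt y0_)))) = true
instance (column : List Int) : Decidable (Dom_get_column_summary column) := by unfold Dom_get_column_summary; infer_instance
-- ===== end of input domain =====

-- B replaces A's single interleaved accumulator loop (with break) by a find-pass for the
-- top piece, a takewhile boundary, and two tallies over that prefix (objective: idiomatic).

-- ===== PORT A =====
-- literal port of A's for-loop with early break: state (count, top_piece, free_spaces)
def goA_get_column_summary : List Int → Int → Int → Int → Int × Int × Int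
  | [], count, top, free => (top, count, free)
  | c :: rest, count, top, free =>
    if c > 0 then
      let top' := if count = 0 then c else top
      if c = top' then goA_get_column_summary rest (count + 1) top' free
      else (top', count, free)
    else goA_get_column_summary rest count top (free + 1)

def get_column_summary (column : List Int) : Int × Int × Int :=
  goA_get_column_summary column 0 0 0

-- ===== PORT B =====
-- next((c for c in column if c > 0), 0)
def bTop_get_column_summary (column : List Int) : Int :=
  (column.find? (fun c => c > 0)).getD 0

-- index of the first cell with c > 0 and c != top, else len(column)
def bEnd_get_column_summary (top : Int) : List Int → Nat
  | [] => 0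
  | c :: rest => if c > 0 ∧ c ≠ top then 0 else bEnd_get_column_summary top rest + 1

def get_column_summary_alt (column : List Int) : Int × Int × Int :=
  let top := bTop_get_column_summary column
  let pfx := column.take (bEnd_get_column_summary top column)
  let free : Int := (pfx.countP (fun c => decide (c ≤ 0)) : Int)
  let count : Int := if top > 0 then (pfx.count top : Int) else 0
  (top, count, free)

-- ===== PRECONDITION & SPEC =====
def Spec_get_column_summary (column : List Int) (out : Int × Int × Int) : Prop := out = get_column_summary_alt column
instance (column : List Int) (out : Int × Int × Int) : Decidable (Spec_get_column_summary column out) := by unfold Spec_get_column_summary; infer_instance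

-- ===== CLAIM (what is proved, stated in full; the proofs are below) =====
def Claim_equal_get_column_summary : Prop := ∀ (column : List Int), Dom_get_column_summary column → Spec_get_column_summary column (get_column_summary column)

-- ===== LEMMAS AND PROOFS =====

-- phase 2: the top piece is fixed (count ≠ 0), A just extends the run until the break
lemma goA_phase2 (top : Int) (htop : 0 < top) :
    ∀ (col : List Int) (count free : Int), 0 < count →
    goA_get_column_summary col count top free =
      (top,
       count + ((col.take (bEnd_get_column_summary top col)).count top : Int),
       free + ((col.take (bEnd_get_column_summary top col)).countP (fun c => decide (c ≤ 0)) : Int)) := by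
  intro col
  induction col with
  | nil => intro count free _; simp [goA_get_column_summary, bEnd_get_column_summary]
  | cons c rest ih =>
    intro count free hc
    have hc' : count ≠ 0 := by omega
    by_cases hpos : c > 0
    · by_cases heq : c = top
      · subst heq
        have h1 : goA_get_column_summary (c :: rest) count c free
            = goA_get_column_summary rest (count + 1) c free := by
          simp [goA_get_column_summary, hpos, hc']
        have h2 : bEnd_get_column_summary c (c :: rest) = bEnd_get_column_summary c rest + 1 := by
          simp [bEnd_get_column_summary]
        have hnle : ¬ (c ≤ 0) := by omega
        rw [h1, ih (count + 1) free (by omega), h2]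
        simp only [List.take_succ_cons, List.count_cons, List.countP_cons, Prod.mk.injEq,
          beq_self_eq_true, if_true, hnle, decide_eq_true_eq, if_false]
        refine ⟨by trivial, by push_cast; ring, by push_cast; ring⟩
      · have h1 : goA_get_column_summary (c :: rest) count top free = (top, count, free) := by
          simp [goA_get_column_summary, hpos, hc', heq]
        have h2 : bEnd_get_column_summary top (c :: rest) = 0 := by
          simp [bEnd_get_column_summary, hpos, heq]
        rw [h1, h2]; simp
    · have h1 : goA_get_column_summary (c :: rest) count top free
          = goA_get_column_summary rest count top (free + 1) := by
        simp [goA_get_column_summary, hpos]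
      have h2 : bEnd_get_column_summary top (c :: rest) = bEnd_get_column_summary top rest + 1 := by
        simp [bEnd_get_column_summary, hpos]
      have hcne : ¬ (c == top) = true := by simp; omega
      have hle : (c ≤ 0) := by omega
      rw [h1, ih count (free + 1) hc, h2]
      simp only [List.take_succ_cons, List.count_cons, List.countP_cons, Prod.mk.injEq,
        hcne, hle, decide_eq_true_eq, if_true]
      refine ⟨by trivial, by push_cast; ring, by push_cast; ring⟩

-- phase 1: no piece seen yet (count = 0, top = 0), only free_spaces accumulates
lemma goA_phase1 :
    ∀ (col : List Int) (free : Int),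
    goA_get_column_summary col 0 0 free =
      (bTop_get_column_summary col,
       (if bTop_get_column_summary col > 0 then
          ((col.take (bEnd_get_column_summary (bTop_get_column_summary col) col)).count (bTop_get_column_summary col) : Int)
        else 0),
       free + ((col.take (bEnd_get_column_summary (bTop_get_column_summary col) col)).countP (fun c => decide (c ≤ 0)) : Int)) := by
  intro col
  induction col with
  | nil =>
    intro free
    simp [goA_get_column_summary, bTop_get_column_summary, bEnd_get_column_summary, List.find?]
  | cons c rest ih =>
    intro free
    by_cases hpos : c > 0
    · have htop : bTop_get_column_summary (c :: rest) = c := by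
        simp [bTop_get_column_summary, List.find?, hpos]
      have h1 : goA_get_column_summary (c :: rest) 0 0 free
          = goA_get_column_summary rest 1 c free := by
        simp [goA_get_column_summary, hpos]
      have h2 : bEnd_get_column_summary c (c :: rest) = bEnd_get_column_summary c rest + 1 := by
        simp [bEnd_get_column_summary]
      have hnle : ¬ (c ≤ 0) := by omega
      rw [h1, goA_phase2 c hpos rest 1 free (by omega), htop, h2]
      simp only [List.take_succ_cons, List.count_cons, List.countP_cons, Prod.mk.injEq,
        beq_self_eq_true, if_true, hnle, decide_eq_true_eq, if_false, hpos]
      refine ⟨by trivial, by push_cast; ring, by push_cast; ring⟩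
    · have htop : bTop_get_column_summary (c :: rest) = bTop_get_column_summary rest := by
        simp [bTop_get_column_summary, List.find?, hpos]
      have h1 : goA_get_column_summary (c :: rest) 0 0 free
          = goA_get_column_summary rest 0 0 (free + 1) := by
        simp [goA_get_column_summary, hpos]
      have h2 : ∀ t, bEnd_get_column_summary t (c :: rest) = bEnd_get_column_summary t rest + 1 := by
        intro t; simp [bEnd_get_column_summary, hpos]
      have hle : c ≤ 0 := by omega
      rw [h1, ih (free + 1), htop, h2]
      simp only [List.take_succ_cons, List.count_cons, List.countP_cons, Prod.mk.injEq,
        hle, decide_eq_true_eq, if_true]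
      refine ⟨by trivial, ?_, by push_cast; ring⟩
      by_cases ht : bTop_get_column_summary rest > 0
      · have hcne : ¬ c = bTop_get_column_summary rest := by omega
        simp [ht, hcne]
      · simp [ht]

-- ===== VERDICT (by name: the statement is the Claim_ definition above) =====
theorem get_column_summary_spec : Claim_equal_get_column_summary := by
  intro column _
  show get_column_summary column = get_column_summary_alt column
  rw [get_column_summary, goA_phase1 column 0]
  simp [get_column_summary_alt]
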